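-- pv_equiv track=rewrite | github.com/aqitya/gametheory-cv | homefuns/HomeFun 1/TicTacToe.py | PrimitiveValue
-- ===== SOURCE A (Python) =====
-- def PrimitiveValue(board):
--     counts = []
--     for row in board:
--         counts.append(sum(row))
--
--     total = sum(counts)
--     if total <= 0:
--         next_player = 1
--     else:
--         next_player = -1
--     other_player = -next_player
--
--     for row in board:
--         row_win = True
--         for cell in row:
--             if cell != other_player:
--                 row_win = False
--                 break
--         if row_win:
--             return 'lose'
--
--     for j in range(3):
--         col_win = True
--         for i in range(3):
--             if board[i][j] != other_player:
--                 col_win = False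
--                 break
--         if col_win:
--             return 'lose'
--
--     diag1 = True
--     for i in range(3):
--         if board[i][i] != other_player:
--             diag1 = False
--             break
--     if diag1:
--         return 'lose'
--
--     diag2 = True
--     for i in range(3):
--         if board[i][2 - i] != other_player:
--             diag2 = False
--             break
--     if diag2:
--         return 'lose'
--
--     tie = True
--     for i in range(3):
--         for j in range(3):
--             if board[i][j] == 0:
--                 tie = False
--                 break
--         if not tie:
--             break
--
--     if tie:
--         return 'tie'
--
--     return 'not_primitive'
-- ===== SOURCE B (Python) =====
-- WINS = (0o111, 0o222, 0o444, 0o421, 0o124)  # columns and diagonals; rows are judged by the set test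
--
--
-- def PrimitiveValue(board):
--     total = sum(map(sum, board))
--     other_player = -1 if total <= 0 else 1
--     # a row is a win for other_player iff its value set is contained in {other_player}
--     if any(set(row) <= {other_player} for row in board):
--         return 'lose'
--     # bitmasks over the 3x3 grid: omask = other_player's marks, fmask = occupied cells
--     omask = fmask = 0
--     for i in range(3):
--         for j in range(3):
--             bit = 1 << (3 * i + j)
--             cell = board[i][j]
--             if cell == other_player:
--                 omask |= bit
--             if cell != 0:
--                 fmask |= bit
--     if any(omask & w == w for w in WINS):
--         return 'lose'
--     if fmask == 0o777:
--         return 'tie'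
--     return 'not_primitive'
-- ===== Notes on version B (the rewrite author's own statement) =====
-- stated objective: alternative
-- what changed: Replaces A's four flag-and-break index scans (rows, columns, two diagonals) and nested tie scan with a set-containment test per row (set(row) <= {other_player}) plus two 9-bit position bitmasks built in one pass over the 3x3 grid, tested against a constant table of column/diagonal win patterns and against the full-board mask 0o777 for the tie.
-- outside the precondition, e.g. on PrimitiveValue([[2, 0, 0]]): A returns 'not_primitive', B raises IndexError; on PrimitiveValue([[1, 0, 2], [0, -1]]): A returns 'not_primitive', B raises IndexError
import Mathlib
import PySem

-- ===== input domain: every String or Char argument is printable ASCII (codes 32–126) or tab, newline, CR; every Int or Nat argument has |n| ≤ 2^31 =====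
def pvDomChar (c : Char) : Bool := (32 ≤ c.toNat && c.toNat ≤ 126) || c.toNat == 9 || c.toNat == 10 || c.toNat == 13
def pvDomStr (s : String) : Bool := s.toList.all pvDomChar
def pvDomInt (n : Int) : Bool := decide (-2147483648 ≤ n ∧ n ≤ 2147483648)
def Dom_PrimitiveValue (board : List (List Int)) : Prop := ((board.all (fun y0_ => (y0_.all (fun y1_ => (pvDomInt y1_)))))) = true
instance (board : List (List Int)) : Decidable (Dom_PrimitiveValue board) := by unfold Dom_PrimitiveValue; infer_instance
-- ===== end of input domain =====

-- B replaces A's four flag-and-break index scans and nested tie scan by a set-containment test per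
-- row plus two 9-bit position bitmasks matched against a constant table of column/diagonal win
-- patterns (objective: alternative).

-- ===== PORT A =====
-- board[i][j]; inside Pre_ every index A's scans actually reach is in range, so the `getD 0` default is never used.
def pvACell (board : List (List Int)) (i j : Int) : Int :=
  ((PySem.List.pyGet? board i).bind (fun r => PySem.List.pyGet? r j)).getD 0

def PrimitiveValue (board : List (List Int)) : String :=
  let counts := board.foldl (fun acc row => acc ++ [row.foldl (· + ·) 0]) []
  let total := counts.foldl (· + ·) 0
  let next_player : Int := if total ≤ 0 then 1 else -1
  let other_player := -next_player
  -- `any` / `all` mirror the break-driven scans (early exit at the first mismatch / first winning line)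
  if board.any (fun row => row.all (fun cell => cell == other_player)) then "lose"
  else if (PySem.List.pyRange 0 3 1).any
      (fun j => (PySem.List.pyRange 0 3 1).all (fun i => pvACell board i j == other_player)) then "lose"
  else if (PySem.List.pyRange 0 3 1).all (fun i => pvACell board i i == other_player) then "lose"
  else if (PySem.List.pyRange 0 3 1).all (fun i => pvACell board i (2 - i) == other_player) then "lose"
  else if !(PySem.List.pyRange 0 3 1).any
      (fun i => (PySem.List.pyRange 0 3 1).any (fun j => pvACell board i j == 0)) then "tie"
  else "not_primitive"

-- ===== PORT B =====
def pvBCell (board : List (List Int)) (i j : Int) : Int :=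
  ((PySem.List.pyGet? board i).bind (fun r => PySem.List.pyGet? r j)).getD 0

-- Source B's WINS constant: the five column/diagonal win patterns as 9-bit masks (0o111, 0o222, 0o444, 0o421, 0o124)
def pvWins : List Nat := [73, 146, 292, 273, 84]

def PrimitiveValue_alt (board : List (List Int)) : String :=
  let total := (board.map List.sum).sum
  let other_player : Int := if total ≤ 0 then -1 else 1
  -- set(row) <= {other_player}
  if board.any (fun row =>
      PySem.Set.issubset (PySem.Set.ofList row) (PySem.Set.ofList [other_player])) then "lose"
  else
    -- one pass over the 3x3 grid accumulating (omask, fmask); 3*i+j is 0..8 so `.toNat` is exact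
    let m := (PySem.List.pyRange 0 3 1).foldl (fun s i =>
        (PySem.List.pyRange 0 3 1).foldl (fun s j =>
          let bit : Nat := 1 <<< (3 * i + j).toNat
          let cell := pvBCell board i j
          ((if cell == other_player then s.1 ||| bit else s.1),
           (if cell != 0 then s.2 ||| bit else s.2))) s) ((0 : Nat), (0 : Nat))
    if pvWins.any (fun w => (m.1 &&& w) == w) then "lose"
    else if m.2 == 511 then "tie"
    else "not_primitive"

-- ===== PRECONDITION & SPEC =====
-- Pre_ admits the boards on which A completes without an IndexError: boards with a full row of
-- other_player marks (A returns 'lose' from its first scan before any indexing) and boards whose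
-- first three rows have at least three cells each.  Excluded are the remaining ragged boards, on
-- which A either raises IndexError or returns a value only because its early `break`s happen to
-- dodge the out-of-range index — an accident of A's break placement that B's uniform grid pass
-- does not reproduce (B raises IndexError there).
def Pre_PrimitiveValue (board : List (List Int)) : Prop :=
  (∃ row ∈ board, ∀ c ∈ row, c = (if (board.map List.sum).sum ≤ 0 then (-1 : Int) else 1))
  ∨ (3 ≤ board.length ∧ ∀ row ∈ board.take 3, 3 ≤ row.length)
instance (board : List (List Int)) : Decidable (Pre_PrimitiveValue board) := by
  unfold Pre_PrimitiveValue; infer_instance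
def pvWitness_PrimitiveValue : List (List Int) := [[1, -1, 0], [0, 1, 0], [-1, 0, 0]]

def Spec_PrimitiveValue (board : List (List Int)) (out : String) : Prop := out = PrimitiveValue_alt board
instance (board : List (List Int)) (out : String) : Decidable (Spec_PrimitiveValue board out) := by
  unfold Spec_PrimitiveValue; infer_instance

-- ===== CLAIM (what is proved, stated in full; the proofs are below) =====
def Claim_equal_PrimitiveValue : Prop := ∀ (board : List (List Int)), Dom_PrimitiveValue board → Pre_PrimitiveValue board → Spec_PrimitiveValue board (PrimitiveValue board)

-- ===== LEMMAS AND PROOFS =====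

theorem if3or {α : Type} (a b c : Bool) (x e : α) :
    (if a then x else if b then x else if c then x else e) = (if (a || b || c) then x else e) := by
  cases a <;> cases b <;> cases c <;> simp

theorem iteB_congr {α : Type} {a b : Bool} {x u v : α} (h : a = b) (h2 : u = v) :
    (if a then x else u) = (if b then x else v) := by subst h; subst h2; rfl

theorem subset_singleton (row : List Int) (o : Int) :
    PySem.Set.issubset (PySem.Set.ofList row) (PySem.Set.ofList [o])
      = row.all (fun c => c == o) := by
  rw [Bool.eq_iff_iff]
  simp [PySem.Set.issubset_iff, PySem.Set.mem_ofList, List.all_eq_true]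

-- the two ports agree on EVERY board (both total via pvACell/pvBCell); Pre_ only delimits
-- the inputs on which the Pythons return and the ports are their faithful values
set_option maxHeartbeats 4000000 in
theorem pv_core (board : List (List Int)) :
    PrimitiveValue board = PrimitiveValue_alt board := by
  unfold PrimitiveValue PrimitiveValue_alt
  rw [PySem.List.foldl_append_singleton_eq_map]
  have hsum : List.foldl (· + · : Int → Int → Int) 0 = List.sum :=
    funext fun l => (l.sum_eq_foldl).symm
  simp only [hsum, List.nil_append, subset_singleton,
    show pvBCell = pvACell from rfl,
    show PySem.List.pyRange 0 3 1 = [0, 1, 2] from by decide,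
    show (2 : Int) - 0 = 2 from by norm_num, show (2 : Int) - 1 = 1 from by norm_num,
    show (2 : Int) - 2 = 0 from by norm_num,
    List.any_cons, List.any_nil, List.all_cons, List.all_nil,
    List.foldl_cons, List.foldl_nil, bne]
  simp only [apply_ite Neg.neg, neg_neg]
  generalize (if (board.map List.sum).sum ≤ 0 then (-1 : Int) else 1) = o
  generalize board.any (fun row => row.all (fun c => c == o)) = r
  generalize hp00 : (pvACell board 0 0 == o) = p00
  generalize hp01 : (pvACell board 0 1 == o) = p01
  generalize hp02 : (pvACell board 0 2 == o) = p02
  generalize hp10 : (pvACell board 1 0 == o) = p10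
  generalize hp11 : (pvACell board 1 1 == o) = p11
  generalize hp12 : (pvACell board 1 2 == o) = p12
  generalize hp20 : (pvACell board 2 0 == o) = p20
  generalize hp21 : (pvACell board 2 1 == o) = p21
  generalize hp22 : (pvACell board 2 2 == o) = p22
  generalize hq00 : (pvACell board 0 0 == 0) = q00
  generalize hq01 : (pvACell board 0 1 == 0) = q01
  generalize hq02 : (pvACell board 0 2 == 0) = q02
  generalize hq10 : (pvACell board 1 0 == 0) = q10
  generalize hq11 : (pvACell board 1 1 == 0) = q11
  generalize hq12 : (pvACell board 1 2 == 0) = q12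
  generalize hq20 : (pvACell board 2 0 == 0) = q20
  generalize hq21 : (pvACell board 2 1 == 0) = q21
  generalize hq22 : (pvACell board 2 2 == 0) = q22
  cases r
  · clear hp00 hp01 hp02 hp10 hp11 hp12 hp20 hp21 hp22 hq00 hq01 hq02 hq10 hq11 hq12 hq20 hq21 hq22 hsum
    simp only [Bool.false_eq_true, if_false]
    rw [if3or]
    apply iteB_congr
    · revert p00 p01 p02 p10 p11 p12 p20 p21 p22
      decide
    · apply iteB_congr
      · revert q00 q01 q02 q10 q11 q12 q20 q21 q22
        decide
      · rfl
  · simp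

-- ===== VERDICT (by name: the statement is the Claim_ definition above) =====
theorem PrimitiveValue_spec : Claim_equal_PrimitiveValue := by
  intro board _ _
  exact pv_core board
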